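-- pv_equiv track=rewrite | github.com/bollu/human-analysis-lab-matrix-problem | general-matmul.py | matdiagtoraw
-- ===== SOURCE A (Python) =====
-- def matdiagdim(m):
--     assert len(m) == len(m[0])
--     return (len(m), len(m[0][0]))
--
-- def matdiagtoraw(m):
--     S, D = matdiagdim(m)
--
--     out = [[0 for _ in range(S * D)] for _ in range(S * D)]
--
--     for i in range(S * D):
--         for j in range(S * D):
--             si = i // D
--             sj = j // D
--
--             di = i % D
--             dj = j % D
--
--             if (di == dj):
--                 out[i][j] = m[si][sj][di]
--             else:
--                 out[i][j] = 0
--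
--     return out
-- ===== SOURCE B (Python) =====
-- def matdiagdim(m):
--     assert len(m) == len(m[0])
--     return (len(m), len(m[0][0]))
--
-- def matdiagtoraw(m):
--     S, D = matdiagdim(m)
--     rows = []
--     for si in range(S):
--         for d in range(D):
--             row = []
--             for sj in range(S):
--                 row.extend([0] * d + [m[si][sj][d]] + [0] * (D - 1 - d))
--             rows.append(row)
--     return rows
-- ===== Notes on version B (the rewrite author's own statement) =====
-- stated objective: alternative
-- what changed: B never allocates or mutates a dense zero matrix: it builds each output row functionally by concatenating S length-D unit blocks (zeros with the single diagonal value in place), instead of A's dense (i,j) scan with an i%D==j%D branch assigning into a pre-built zero matrix.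
import Mathlib
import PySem

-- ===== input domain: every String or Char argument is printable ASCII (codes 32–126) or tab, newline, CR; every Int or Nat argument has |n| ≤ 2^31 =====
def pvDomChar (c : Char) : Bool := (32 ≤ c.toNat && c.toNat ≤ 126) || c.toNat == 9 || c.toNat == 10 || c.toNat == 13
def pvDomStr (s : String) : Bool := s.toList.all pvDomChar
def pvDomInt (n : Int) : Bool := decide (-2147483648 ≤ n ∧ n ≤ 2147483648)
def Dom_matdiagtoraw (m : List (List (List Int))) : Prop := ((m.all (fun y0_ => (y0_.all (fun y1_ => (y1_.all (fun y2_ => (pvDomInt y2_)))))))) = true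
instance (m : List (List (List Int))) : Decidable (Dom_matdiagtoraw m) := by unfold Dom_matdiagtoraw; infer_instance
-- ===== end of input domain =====

-- B builds each output row functionally by concatenating length-D unit blocks (zeros with
-- the diagonal value in place), instead of A's dense indexed scan mutating a zero matrix.

-- ===== PORT A =====

-- out[i][j] = v  (Python in-place assignment; no-op only on out-of-range indices, which Pre_ excludes)
def pvSet2 (o : List (List Int)) (i j : Nat) (v : Int) : List (List Int) :=
  o.modify i (fun r => r.set j v)

-- m[si][sj][d] with nonnegative in-range indices (exact under Pre_; defaults are never hit there)
def pvFetch (m : List (List (List Int))) (si sj d : Nat) : Int :=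
  (((m[si]?.getD [])[sj]?.getD [])[d]?.getD 0)

def matdiagtoraw (m : List (List (List Int))) : List (List Int) :=
  -- S, D = matdiagdim(m); the assert and the indexing of m[0][0] can only fail outside Pre_
  let S := m.length
  let D := ((m.headD []).headD []).length
  let n := S * D
  -- out = [[0 for _ in range(S*D)] for _ in range(S*D)]
  let out0 := (List.range n).map (fun _ => (List.range n).map (fun _ => (0 : Int)))
  (List.range n).foldl (fun out i =>
    (List.range n).foldl (fun out j =>
      -- si = i // D; sj = j // D; di = i % D; dj = j % D  (all nonnegative, so Nat / and % are exact)
      if i % D = j % D then pvSet2 out i j (pvFetch m (i / D) (j / D) (i % D))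
      else pvSet2 out i j 0) out) out0

-- ===== PORT B =====

-- [0] * d + [m[si][sj][d]] + [0] * (D - 1 - d): the length-D unit block with v at slot d
def pvUnit (d D : Nat) (v : Int) : List Int :=
  List.replicate d 0 ++ v :: List.replicate (D - 1 - d) 0

-- m[si][sj][d] (exact under Pre_; defaults are never hit there)
def pvAt (m : List (List (List Int))) (si sj d : Nat) : Int :=
  ((m.getD si []).getD sj []).getD d 0

def matdiagtoraw_alt (m : List (List (List Int))) : List (List Int) :=
  let S := m.length
  let D := ((m.headD []).headD []).length
  (List.range S).flatMap (fun si =>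
    (List.range D).map (fun d =>
      (List.range S).flatMap (fun sj => pvUnit d D (pvAt m si sj d))))

-- ===== PRECONDITION & SPEC =====
-- Pre_ is exactly the set of inputs on which the Python A returns: m nonempty, the assert
-- len(m) == len(m[0]) holds, and — unless D = len(m[0][0]) = 0, in which case the loops
-- never run — every row is long enough for the S column indices and every accessed block
-- is long enough for the D diagonal indices.
def Pre_matdiagtoraw (m : List (List (List Int))) : Prop :=
  m ≠ [] ∧ (m.headD []).length = m.length ∧
    (((m.headD []).headD []).length = 0 ∨
      ∀ row ∈ m, m.length ≤ row.length ∧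
        ∀ blk ∈ row.take m.length, ((m.headD []).headD []).length ≤ blk.length)
instance (m : List (List (List Int))) : Decidable (Pre_matdiagtoraw m) := by
  unfold Pre_matdiagtoraw; infer_instance

def pvWitness_matdiagtoraw : List (List (List Int)) := [[[1]]]

def Spec_matdiagtoraw (m : List (List (List Int))) (out : List (List Int)) : Prop := out = matdiagtoraw_alt m
instance (m : List (List (List Int))) (out : List (List Int)) : Decidable (Spec_matdiagtoraw m out) := by unfold Spec_matdiagtoraw; infer_instance

-- ===== CLAIM (what is proved, stated in full; the proofs are below) =====
def Claim_equal_matdiagtoraw : Prop := ∀ (m : List (List (List Int))), Dom_matdiagtoraw m → Pre_matdiagtoraw m → Spec_matdiagtoraw m (matdiagtoraw m)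

-- ===== LEMMAS AND PROOFS =====

-- entry (i, j) of a matrix, defaulting to 0 out of range
def pvGet2 (o : List (List Int)) (i j : Nat) : Int := ((o[i]?.getD [])[j]?.getD 0)

-- "o is an n × n matrix"
def pvSh (n : Nat) (o : List (List Int)) : Prop :=
  o.length = n ∧ ∀ (k : Nat) (r : List Int), o[k]? = some r → r.length = n

-- one write (i, j, v) applied to the matrix state
def pvApply (o : List (List Int)) (w : Nat × Nat × Int) : List (List Int) := pvSet2 o w.1 w.2.1 w.2.2

-- the common value both programs leave at (i, j)
def pvE (m : List (List (List Int))) (D i j : Nat) : Int :=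
  if i % D = j % D then pvFetch m (i / D) (j / D) (i % D) else 0

-- A's write sequence
def pvWA (m : List (List (List Int))) (n D : Nat) : List (Nat × Nat × Int) :=
  (List.range n).flatMap (fun i => (List.range n).map (fun j => (i, j, pvE m D i j)))

theorem pvSh_apply {n : Nat} {o : List (List Int)} (w : Nat × Nat × Int) (h : pvSh n o) :
    pvSh n (pvApply o w) := by
  obtain ⟨h1, h2⟩ := h
  refine ⟨by simp [pvApply, pvSet2, h1], ?_⟩
  intro k r hk
  simp [pvApply, pvSet2, List.getElem?_modify] at hk
  rcases ho : o[k]? with _ | r'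
  · simp [ho] at hk
  · simp [ho] at hk
    by_cases hwk : w.1 = k
    · simp [hwk] at hk
      subst hk; simpa using h2 k r' ho
    · simp [hwk] at hk
      subst hk; exact h2 k r' ho

theorem pvSh_foldl {n : Nat} (ws : List (Nat × Nat × Int)) (o : List (List Int)) (h : pvSh n o) :
    pvSh n (ws.foldl pvApply o) := by
  induction ws generalizing o with
  | nil => exact h
  | cons w t ih => exact ih _ (pvSh_apply w h)

theorem pvGet2_apply {n : Nat} {o : List (List Int)} {w : Nat × Nat × Int} {i j : Nat}
    (hsh : pvSh n o) (_hw1 : w.1 < n) (hw2 : w.2.1 < n) (hi : i < n) (_hj : j < n) :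
    pvGet2 (pvApply o w) i j = if w.1 = i ∧ w.2.1 = j then w.2.2 else pvGet2 o i j := by
  obtain ⟨h1, h2⟩ := hsh
  have hio : i < o.length := h1 ▸ hi
  have hr : o[i]? = some (o[i]'hio) := List.getElem?_eq_getElem hio
  have hrl : (o[i]'hio).length = n := h2 i _ hr
  unfold pvGet2 pvApply pvSet2
  rw [List.getElem?_modify, hr]
  simp only [Option.map_eq_map, Option.map_some, Option.getD_some]
  by_cases hwi : w.1 = i
  · rw [if_pos hwi, List.getElem?_set]
    by_cases hwj : w.2.1 = j
    · rw [if_pos hwj, if_pos (by rw [hrl]; exact hw2)]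
      simp [hwi, hwj]
    · rw [if_neg hwj]
      simp [hwi, hwj]
  · rw [if_neg hwi]
    simp [hwi]

theorem pvGet2_foldl {n : Nat} (ws : List (Nat × Nat × Int)) (o : List (List Int)) (i j : Nat)
    (hsh : pvSh n o) (hws : ∀ w ∈ ws, w.1 < n ∧ w.2.1 < n) (hi : i < n) (hj : j < n) :
    pvGet2 (ws.foldl pvApply o) i j =
      ((ws.reverse.find? (fun w => w.1 == i && w.2.1 == j)).map (fun w => w.2.2)).getD
        (pvGet2 o i j) := by
  induction ws generalizing o with
  | nil => simp
  | cons w t ih =>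
    have hw := hws w (List.mem_cons_self)
    have ht : ∀ w ∈ t, w.1 < n ∧ w.2.1 < n := fun x hx => hws x (List.mem_cons_of_mem _ hx)
    rw [List.foldl_cons, ih _ (pvSh_apply w hsh) ht, List.reverse_cons, List.find?_append]
    rcases hf : t.reverse.find? (fun w => w.1 == i && w.2.1 == j) with _ | x
    · simp only [hf, Option.none_or]
      rw [pvGet2_apply hsh hw.1 hw.2 hi hj]
      by_cases hc : w.1 = i ∧ w.2.1 = j
      · simp [List.find?, hc.1, hc.2]
      · have : ¬ (w.1 == i && w.2.1 == j) = true := by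
          simp only [Bool.and_eq_true, beq_iff_eq]; exact hc
        simp [List.find?, this, hc]
    · simp [hf]

-- pvGet2 of A's initial zero matrix
theorem pvGet2_zeroA {n i j : Nat} (hi : i < n) :
    pvGet2 ((List.range n).map (fun _ => (List.range n).map (fun _ => (0 : Int)))) i j = 0 := by
  unfold pvGet2
  rw [List.getElem?_map, List.getElem?_range hi]
  rcases Nat.lt_or_ge j n with hj | hj
  · simp
  · have h : ((List.range n).map (fun _ => (0 : Int))).length ≤ j := by simpa using hj
    simp only [Option.map_some, Option.getD_some]
    rw [List.getElem?_eq_none h, Option.getD_none]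

theorem pvSh_zeroA {n : Nat} :
    pvSh n ((List.range n).map (fun _ => (List.range n).map (fun _ => (0 : Int)))) := by
  refine ⟨by simp, fun k r hk => ?_⟩
  simp only [List.getElem?_map] at hk
  rcases hkr : (List.range n)[k]? with _ | x
  · simp [hkr] at hk
  · simp [hkr] at hk; simp [← hk]

theorem pvWA_mem {m : List (List (List Int))} {n D : Nat} {w : Nat × Nat × Int}
    (h : w ∈ pvWA m n D) : ∃ i < n, ∃ j < n, w = (i, j, pvE m D i j) := by
  simp only [pvWA, List.mem_flatMap, List.mem_map, List.mem_range] at h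
  obtain ⟨i, hi, j, hj, hw⟩ := h
  exact ⟨i, hi, j, hj, hw.symm⟩

theorem pvWA_bounds {m : List (List (List Int))} {n D : Nat} :
    ∀ w ∈ pvWA m n D, w.1 < n ∧ w.2.1 < n := by
  intro w hw
  obtain ⟨i, hi, j, hj, rfl⟩ := pvWA_mem hw
  exact ⟨hi, hj⟩

-- the last (indeed only) write of A at (i, j) carries pvE m D i j
theorem pvWA_find {m : List (List (List Int))} {n D i j : Nat} (hi : i < n) (hj : j < n) :
    (((pvWA m n D).reverse.find? (fun w => w.1 == i && w.2.1 == j)).map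
        (fun w => w.2.2)).getD 0 = pvE m D i j := by
  rcases hf : (pvWA m n D).reverse.find? (fun w => w.1 == i && w.2.1 == j) with _ | x
  · exfalso
    have hmem : (i, j, pvE m D i j) ∈ (pvWA m n D).reverse := by
      simp only [List.mem_reverse, pvWA, List.mem_flatMap, List.mem_map, List.mem_range]
      exact ⟨i, hi, j, hj, rfl⟩
    have := List.find?_eq_none.mp hf _ hmem
    exact this (by simp)
  · have hp := List.find?_some hf
    have hx := List.mem_reverse.mp (List.mem_of_find?_eq_some hf)
    obtain ⟨i', hi', j', hj', rfl⟩ := pvWA_mem hx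
    simp only [Bool.and_eq_true, beq_iff_eq] at hp
    rw [hf]
    simp [hp.1, hp.2]

-- matrices of the same shape with equal entries are equal
theorem pvEq_of_get2 {n : Nat} {o1 o2 : List (List Int)} (h1 : pvSh n o1) (h2 : pvSh n o2)
    (h : ∀ i j, i < n → j < n → pvGet2 o1 i j = pvGet2 o2 i j) : o1 = o2 := by
  obtain ⟨l1, r1⟩ := h1
  obtain ⟨l2, r2⟩ := h2
  refine List.ext_getElem (by omega) (fun i hi1 hi2 => ?_)
  have e1 : o1[i]? = some (o1[i]'hi1) := List.getElem?_eq_getElem hi1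
  have e2 : o2[i]? = some (o2[i]'hi2) := List.getElem?_eq_getElem hi2
  have hl1 := r1 i _ e1
  have hl2 := r2 i _ e2
  refine List.ext_getElem (by omega) (fun j hj1 hj2 => ?_)
  have := h i j (by omega) (by omega)
  unfold pvGet2 at this
  rw [e1, e2] at this
  simpa [List.getElem?_eq_getElem hj1, List.getElem?_eq_getElem hj2] using this

-- A's nested fold is the fold of A's write sequence
theorem pvA_eq_fold (m : List (List (List Int))) :
    matdiagtoraw m = (pvWA m (m.length * ((m.headD []).headD []).length)
        ((m.headD []).headD []).length).foldl pvApply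
      ((List.range (m.length * ((m.headD []).headD []).length)).map
        (fun _ => (List.range (m.length * ((m.headD []).headD []).length)).map
          (fun _ => (0 : Int)))) := by
  unfold matdiagtoraw pvWA
  simp only [List.foldl_flatMap, List.foldl_map, pvApply, pvE, apply_ite, ite_self]

-- ===== B-side lemmas: the flatMap-of-fixed-length-blocks structure =====

theorem pvFlat_len {α : Type} (S D : Nat) (f : Nat → List α) (h : ∀ k, (f k).length = D) :
    ((List.range S).flatMap f).length = S * D := by
  induction S with
  | zero => simp
  | succ s ih =>
    rw [List.range_succ, List.flatMap_append, List.length_append, ih]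
    simp [h, Nat.succ_mul]

theorem pvFlat_get {α : Type} (S D i : Nat) (f : Nat → List α) (h : ∀ k, (f k).length = D)
    (hi : i < S * D) : ((List.range S).flatMap f)[i]? = (f (i / D))[i % D]? := by
  induction S generalizing f i with
  | zero => omega
  | succ s ih =>
    have hD : 0 < D := Nat.pos_of_ne_zero (by rintro rfl; rw [Nat.mul_zero] at hi; omega)
    rw [List.range_succ_eq_map, List.flatMap_cons, List.flatMap_map]
    by_cases hiD : i < D
    · rw [List.getElem?_append_left (by rw [h 0]; exact hiD),
        Nat.div_eq_of_lt hiD, Nat.mod_eq_of_lt hiD]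
    · rw [List.getElem?_append_right (by rw [h 0]; omega), h 0]
      have hrec := ih (i - D) (fun k => f (k + 1)) (fun k => h (k + 1)) (by
        have : i < s * D + D := by rw [Nat.succ_mul] at hi; omega
        omega)
      have hdiv : (i - D) / D + 1 = i / D := by
        rw [Nat.div_eq i D, if_pos ⟨hD, by omega⟩]
      have hmod : (i - D) % D = i % D := by
        conv_rhs => rw [Nat.mod_eq, if_pos ⟨hD, by omega⟩]
      rw [hrec]
      simp only [hdiv, hmod]

theorem pvUnit_len {d D : Nat} (hd : d < D) (v : Int) : (pvUnit d D v).length = D := by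
  simp [pvUnit]; omega

theorem pvUnit_get {d D t : Nat} (hd : d < D) (ht : t < D) (v : Int) :
    (pvUnit d D v)[t]? = some (if t = d then v else 0) := by
  unfold pvUnit
  rcases Nat.lt_trichotomy t d with hlt | heq | hgt
  · rw [List.getElem?_append_left (by simpa using hlt)]
    simp [hlt, Nat.ne_of_lt hlt]
  · subst heq
    rw [List.getElem?_append_right (by simp)]
    simp
  · rw [List.getElem?_append_right (by simp; omega)]
    simp only [List.length_replicate]
    have htd : t - d = (t - d - 1) + 1 := by omega
    rw [htd]
    simp [Nat.ne_of_gt hgt, show t - d - 1 < D - 1 - d by omega]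

theorem pvAt_eq_fetch (m : List (List (List Int))) (si sj d : Nat) :
    pvAt m si sj d = pvFetch m si sj d := by
  simp [pvAt, pvFetch, List.getD]

-- B's output is an (S*D) × (S*D) matrix
theorem pvB_sh (m : List (List (List Int))) :
    pvSh (m.length * ((m.headD []).headD []).length) (matdiagtoraw_alt m) := by
  unfold matdiagtoraw_alt pvSh
  set S := m.length
  set D := ((m.headD []).headD []).length
  have hrowlen : ∀ si d, d < D →
      ((List.range S).flatMap (fun sj => pvUnit d D (pvAt m si sj d))).length = S * D :=
    fun si d hd => pvFlat_len S D _ (fun k => pvUnit_len hd _)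
  have houter : ∀ si, ((List.range D).map (fun d =>
      (List.range S).flatMap (fun sj => pvUnit d D (pvAt m si sj d)))).length = D := by
    simp
  refine ⟨pvFlat_len S D _ houter, ?_⟩
  intro k r hk
  have hkS : k < S * D := by
    by_contra hge
    rw [List.getElem?_eq_none (by rw [pvFlat_len S D _ houter]; omega)] at hk
    simp at hk
  rw [pvFlat_get S D k _ houter hkS] at hk
  have hD : 0 < D := Nat.pos_of_ne_zero (by rintro h0; rw [h0, Nat.mul_zero] at hkS; omega)
  have hkD : k % D < D := Nat.mod_lt _ hD
  rw [List.getElem?_map, List.getElem?_range hkD] at hk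
  simp only [Option.map_some, Option.some_inj] at hk  -- hmm name
  rw [← hk]
  exact hrowlen _ _ hkD

-- B's entry (i, j) is pvE m D i j
theorem pvB_get2 (m : List (List (List Int))) (i j : Nat)
    (hi : i < m.length * ((m.headD []).headD []).length)
    (hj : j < m.length * ((m.headD []).headD []).length) :
    pvGet2 (matdiagtoraw_alt m) i j = pvE m ((m.headD []).headD []).length i j := by
  unfold matdiagtoraw_alt pvGet2
  set S := m.length
  set D := ((m.headD []).headD []).length
  have hD : 0 < D := Nat.pos_of_ne_zero (by rintro h0; rw [h0, Nat.mul_zero] at hi; omega)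
  have hiD : i % D < D := Nat.mod_lt _ hD
  have hjD : j % D < D := Nat.mod_lt _ hD
  have houter : ∀ si, ((List.range D).map (fun d =>
      (List.range S).flatMap (fun sj => pvUnit d D (pvAt m si sj d)))).length = D := by
    simp
  rw [pvFlat_get S D i _ houter hi, List.getElem?_map, List.getElem?_range hiD]
  simp only [Option.map_some, Option.getD_some]
  rw [pvFlat_get S D j _ (fun k => pvUnit_len hiD _) hj,
    pvUnit_get hiD hjD, Option.getD_some, pvE, pvAt_eq_fetch]
  by_cases hc : i % D = j % D
  · simp [hc]
  · have hc' : ¬ j % D = i % D := fun h => hc h.symm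
    simp [hc, hc']

-- ===== VERDICT (by name: the statement is the Claim_ definition above) =====
theorem matdiagtoraw_spec : Claim_equal_matdiagtoraw := by
  intro m _ _
  unfold Spec_matdiagtoraw
  rw [pvA_eq_fold]
  refine pvEq_of_get2 (n := m.length * ((m.headD []).headD []).length)
    (pvSh_foldl _ _ pvSh_zeroA) (pvB_sh m) (fun i j hi hj => ?_)
  rw [pvGet2_foldl _ _ _ _ pvSh_zeroA pvWA_bounds hi hj,
    pvGet2_zeroA hi, pvWA_find hi hj, pvB_get2 m i j hi hj]
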